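-- pv_equiv track=rewrite | github.com/joanaalvoeiro/ScotlandYard | ruagomesfreiregamesol.py | valid_combination
-- ===== SOURCE A (Python) =====
-- def valid_combination(Paths, valid_path):
--     valid = True
--     for path0 in Paths[0]:
--         for path1 in Paths[1]:
--             for path2 in Paths[2]:
--                 valid = True
--                 for i in range(len(path0)):
--                     if path0[i] == path1[i] or path0[i] == path2[i] or path1[i] == path2[i]:
--                         valid = False
--                         break
--                 if valid:
--                     valid_path[0] = [path0, path1, path2]
--                     return True
--     return False
-- ===== SOURCE B (Python) =====
-- def _first_collision(x, y):
--     """Index of the first step at which the two paths occupy the same node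
--     (len of the common prefix range if they never collide)."""
--     i = 0
--     for u, v in zip(x, y):
--         if u == v:
--             return i
--         i += 1
--     return i
--
--
-- def valid_combination(Paths, valid_path):
--     g0, g1, g2 = Paths[0], Paths[1], Paths[2]
--     f01 = [[_first_collision(a, b) for b in g1] for a in g0]
--     f02 = [[_first_collision(a, c) for c in g2] for a in g0]
--     f12 = [[_first_collision(b, c) for c in g2] for b in g1]
--     for a, row01, row02 in zip(g0, f01, f02):
--         n = len(a)
--         for b, t01, row12 in zip(g1, row01, f12):
--             if t01 >= n:
--                 for c, t02, t12 in zip(g2, row02, row12):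
--                     if t02 >= n and t12 >= n:
--                         valid_path[0] = [a, b, c]
--                         return True
--     return False
-- ===== Notes on version B (the rewrite author's own statement) =====
-- stated objective: alternative
-- what changed: B precomputes, once per pair of paths, the first step index at which the two paths collide, and the triple loop then just compares the three pairwise first-collision times against the horizon len(path0), instead of A's re-scan of all three paths inside every triple; Pre_ requires all three path groups to be present (len(Paths) >= 3), since when a leading group is empty and Paths is shorter A returns False without ever reading the later groups while B indexes all three up front and raises.
-- outside the precondition, e.g. on valid_combination([[]], []): A returns False, B raises IndexError; on valid_combination([[], []], []): A returns False, B raises IndexError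
import Mathlib
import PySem

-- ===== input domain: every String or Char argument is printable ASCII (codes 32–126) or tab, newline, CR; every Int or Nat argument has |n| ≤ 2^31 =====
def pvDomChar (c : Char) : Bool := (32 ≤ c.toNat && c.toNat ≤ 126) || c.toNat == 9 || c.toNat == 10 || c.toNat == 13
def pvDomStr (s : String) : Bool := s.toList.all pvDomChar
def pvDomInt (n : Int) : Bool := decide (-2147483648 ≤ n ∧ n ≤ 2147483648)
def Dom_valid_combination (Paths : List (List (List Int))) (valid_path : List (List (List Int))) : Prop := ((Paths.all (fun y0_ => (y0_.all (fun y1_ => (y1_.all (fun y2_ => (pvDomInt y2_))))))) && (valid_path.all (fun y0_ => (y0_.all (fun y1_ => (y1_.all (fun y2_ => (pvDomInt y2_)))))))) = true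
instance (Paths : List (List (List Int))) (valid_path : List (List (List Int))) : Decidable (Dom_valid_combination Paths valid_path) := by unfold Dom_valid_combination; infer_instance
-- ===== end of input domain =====

-- B precomputes the first-collision step of every pair of paths once and the triple loop only
-- compares those times against the horizon len(path0), where A re-scans all three paths inside
-- every triple. Return-value equivalence only: both programs also write the found triple into
-- valid_path[0], a mutation not modelled by the ports.

-- ===== PORT A =====
-- inner `for i in range(len(path0))` loop with break: any collision index.
-- list indexing path0[i]/path1[i]/path2[i] is ported as getD (exact for in-range indices;
-- inputs where Python would raise IndexError are excluded by Pre_).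
def pvCollide (p0 p1 p2 : List Int) : Bool :=
  (List.range p0.length).any (fun i =>
    (p0.getD i 0 == p1.getD i 0) || (p0.getD i 0 == p2.getD i 0) || (p1.getD i 0 == p2.getD i 0))

def valid_combination (Paths : List (List (List Int))) (valid_path : List (List (List Int))) : Bool :=
  -- Paths[0]/[1]/[2]: exact under Pre_ (which requires 3 ≤ Paths.length)
  let g0 := Paths.getD 0 []
  let g1 := Paths.getD 1 []
  let g2 := Paths.getD 2 []
  g0.any (fun path0 => g1.any (fun path1 => g2.any (fun path2 => !(pvCollide path0 path1 path2))))

-- ===== PORT B =====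
-- the `i = 0; for u, v in zip(x, y): …; i += 1` loop of _first_collision
def pvFCgo : List (Int × Int) → Nat → Nat
  | [], i => i
  | p :: t, i => if p.1 == p.2 then i else pvFCgo t (i + 1)

def pvFirstCollision (x y : List Int) : Nat := pvFCgo (x.zip y) 0

def valid_combination_alt (Paths : List (List (List Int))) (valid_path : List (List (List Int))) : Bool :=
  let g0 := Paths.getD 0 []
  let g1 := Paths.getD 1 []
  let g2 := Paths.getD 2 []
  let f01 := g0.map (fun a => g1.map (fun b => pvFirstCollision a b))
  let f02 := g0.map (fun a => g2.map (fun c => pvFirstCollision a c))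
  let f12 := g1.map (fun b => g2.map (fun c => pvFirstCollision b c))
  -- for a, row01, row02 in zip(g0, f01, f02): …
  (g0.zip (f01.zip f02)).any (fun t =>
    (g1.zip (t.2.1.zip f12)).any (fun u =>
      decide (t.1.length ≤ u.2.1) &&
        (g2.zip (t.2.2.zip u.2.2)).any (fun v =>
          decide (t.1.length ≤ v.2.1) && decide (t.1.length ≤ v.2.2))))

-- ===== PRECONDITION & SPEC =====
-- pvEv a b c j: A's inner loop, having reached step j, observes a collision there (every list read
-- that observation performs is in range)
def pvEv (a b c : List Int) (j : Nat) : Bool :=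
  decide (j < b.length) &&
    (a.getD j 0 == b.getD j 0 ||
      (decide (j < c.length) && (a.getD j 0 == c.getD j 0 || b.getD j 0 == c.getD j 0)))

-- pvResolves a b c: A's inner loop on this triple never raises IndexError: every step it can reach
-- either performs only in-range reads or is preceded by a collision that breaks the loop
def pvResolves (a b c : List Int) : Bool :=
  (List.range a.length).all (fun i =>
    (decide (i < b.length) && (a.getD i 0 == b.getD i 0 || decide (i < c.length))) ||
      (List.range i).any (pvEv a b c))

-- pvValidT a b c: A's inner loop runs to the end of path0 and reports the triple pairwise collision-free
def pvValidT (a b c : List Int) : Bool :=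
  decide (a.length ≤ b.length) && decide (a.length ≤ c.length) &&
    (List.range a.length).all (fun i =>
      a.getD i 0 != b.getD i 0 && (a.getD i 0 != c.getD i 0 && b.getD i 0 != c.getD i 0))

-- the triples in the lexicographic order A scans them
def pvTriples (g0 g1 g2 : List (List Int)) : List (List Int × List Int × List Int) :=
  g0.flatMap (fun a => g1.flatMap (fun b => g2.map (fun c => (a, b, c))))

-- a triple at which A's scan stops: it is valid (A returns) or does not resolve (A raises)
def pvStop (t : List Int × List Int × List Int) : Bool :=
  !pvResolves t.1 t.2.1 t.2.2 || pvValidT t.1 t.2.1 t.2.2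

-- A returns normally iff the first stopping triple (if any) is valid (and valid_path is writable)
def pvPreOK (g0 g1 g2 : List (List Int)) (vpne : Bool) : Bool :=
  match (pvTriples g0 g1 g2).find? pvStop with
  | none => true
  | some t => pvValidT t.1 t.2.1 t.2.2 && vpne

-- Pre_ is "A returns normally and all three path groups are present": 3 ≤ len(Paths), and either A
-- scans the whole triple product without IndexError and finds no valid triple, or the first triple at
-- which its scan stops is a valid one (A returns True there) and valid_path is nonempty.  Besides the
-- inputs on which A raises, it excludes inputs with fewer than three groups where a leading empty
-- group makes A return False without ever reading the later groups, while B indexes all three up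
-- front and raises IndexError there.
def Pre_valid_combination (Paths : List (List (List Int))) (valid_path : List (List (List Int))) : Prop :=
  3 ≤ Paths.length ∧
  pvPreOK (Paths.getD 0 []) (Paths.getD 1 []) (Paths.getD 2 []) (!valid_path.isEmpty) = true
instance (Paths : List (List (List Int))) (valid_path : List (List (List Int))) : Decidable (Pre_valid_combination Paths valid_path) := by unfold Pre_valid_combination; infer_instance

def pvWitness_valid_combination : List (List (List Int)) × List (List (List Int)) :=
  ([[[1, 2]], [[2, 3]], [[3, 4]]], [[]])

def Spec_valid_combination (Paths : List (List (List Int))) (valid_path : List (List (List Int))) (out : Bool) : Prop := out = valid_combination_alt Paths valid_path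
instance (Paths : List (List (List Int))) (valid_path : List (List (List Int))) (out : Bool) : Decidable (Spec_valid_combination Paths valid_path out) := by unfold Spec_valid_combination; infer_instance

-- ===== CLAIM (what is proved, stated in full; the proofs are below) =====
def Claim_equal_valid_combination : Prop := ∀ (Paths : List (List (List Int))) (valid_path : List (List (List Int))), Dom_valid_combination Paths valid_path → Pre_valid_combination Paths valid_path → Spec_valid_combination Paths valid_path (valid_combination Paths valid_path)

-- ===== LEMMAS AND PROOFS =====

lemma pvAny_congr_mem {α : Type} (l : List α) (f g : α → Bool)
    (h : ∀ x ∈ l, f x = g x) : l.any f = l.any g := by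
  induction l with
  | nil => rfl
  | cons a t ih =>
      simp only [List.any_cons, h a (by simp), ih (fun x hx => h x (by simp [hx]))]

lemma pvAny_zip_tables {α β γ : Type} (xs : List α) (h1 : α → β) (h2 : α → γ)
    (f : α × (β × γ) → Bool) :
    (xs.zip ((xs.map h1).zip (xs.map h2))).any f = xs.any (fun x => f (x, h1 x, h2 x)) := by
  induction xs with
  | nil => rfl
  | cons a t ih => simp [ih]

lemma pvAnd_any {α : Type} (x : Bool) (l : List α) (f : α → Bool) :
    (x && l.any f) = l.any (fun c => x && f c) := by
  cases x <;> simp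

lemma pvFCgo_acc : ∀ (l : List (Int × Int)) (i : Nat), pvFCgo l i = i + pvFCgo l 0
  | [], i => by simp [pvFCgo]
  | p :: t, i => by
      simp only [pvFCgo]
      split_ifs
      · simp
      · rw [pvFCgo_acc t (i + 1), pvFCgo_acc t 1]
        omega

lemma pvFC_ge_iff : ∀ (x y : List Int) (L : Nat), L ≤ x.length → L ≤ y.length →
    (L ≤ pvFirstCollision x y ↔ ∀ i, i < L → x.getD i 0 ≠ y.getD i 0)
  | _, _, 0 => by simp
  | [], _, L + 1 => by intro h _; simp at h
  | _ :: _, [], L + 1 => by intro _ h; simp at h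
  | a :: x, b :: y, L + 1 => by
      intro hx hy
      have ih := pvFC_ge_iff x y L (by simpa using hx) (by simpa using hy)
      simp only [pvFirstCollision, List.zip_cons_cons, pvFCgo] at ih ⊢
      by_cases hab : a = b
      · rw [if_pos (by simp [hab])]
        constructor
        · intro h
          exact absurd h (by omega)
        · intro hall
          have h0 := hall 0 (Nat.succ_pos L)
          simp [hab] at h0
      · rw [if_neg (by simpa using hab), pvFCgo_acc]
        constructor
        · intro h i hi
          cases i with
          | zero => simpa using hab
          | succ j => exact ih.mp (by omega) j (by omega)
        · intro hall
          have := ih.mpr (fun j hj => by simpa using hall (j + 1) (by omega))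
          omega

lemma pvFC_le : ∀ (x y : List Int) (i : Nat), i < x.length → i < y.length →
    x.getD i 0 = y.getD i 0 → pvFirstCollision x y ≤ i
  | [], _, i => by intro h; simp at h
  | _ :: _, [], i => by intro _ h; simp at h
  | a :: x, b :: y, 0 => by
      intro _ _ h
      simp only [List.getD_cons_zero] at h
      simp [pvFirstCollision, pvFCgo, h]
  | a :: x, b :: y, i + 1 => by
      intro hx hy h
      have ih := pvFC_le x y i (by simpa using hx) (by simpa using hy) (by simpa using h)
      simp only [pvFirstCollision, List.zip_cons_cons, pvFCgo] at ih ⊢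
      split_ifs
      · omega
      · rw [pvFCgo_acc]
        omega

lemma pvCollide_iff (a b c : List Int) : pvCollide a b c = true ↔
    ∃ i, i < a.length ∧ (a.getD i 0 = b.getD i 0 ∨ a.getD i 0 = c.getD i 0 ∨ b.getD i 0 = c.getD i 0) := by
  simp [pvCollide, List.any_eq_true, List.mem_range, or_assoc]

-- B's triple test, on a triple with path1/path2 at least as long as path0, is exactly ¬collision
lemma pvTriple (a b c : List Int) (hb : a.length ≤ b.length) (hc : a.length ≤ c.length) :
    (decide (a.length ≤ pvFirstCollision a b) &&
      (decide (a.length ≤ pvFirstCollision a c) && decide (a.length ≤ pvFirstCollision b c)))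
      = !(pvCollide a b c) := by
  rw [Bool.eq_iff_iff]
  simp only [Bool.and_eq_true, Bool.not_eq_true', decide_eq_true_eq]
  rw [Bool.eq_false_iff, Ne, pvCollide_iff,
    pvFC_ge_iff a b a.length le_rfl hb, pvFC_ge_iff a c a.length le_rfl hc,
    pvFC_ge_iff b c a.length hb hc]
  push_neg
  constructor
  · rintro ⟨h1, h2, h3⟩ i hi
    exact ⟨h1 i hi, h2 i hi, h3 i hi⟩
  · intro h
    exact ⟨fun i hi => (h i hi).1, fun i hi => (h i hi).2.1, fun i hi => (h i hi).2.2⟩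

-- both A and B reject a triple that observes an in-range collision
lemma pvColl_sound (a b c : List Int) (h : ∃ i < a.length, pvEv a b c i = true) :
    pvCollide a b c = true ∧
      (decide (a.length ≤ pvFirstCollision a b) &&
        (decide (a.length ≤ pvFirstCollision a c) && decide (a.length ≤ pvFirstCollision b c))) = false := by
  simp only [pvEv, Bool.and_eq_true, Bool.or_eq_true, decide_eq_true_eq, beq_iff_eq] at h
  obtain ⟨i, hia, hib, hcase⟩ := h
  constructor
  · rw [pvCollide_iff]
    exact ⟨i, hia, by tauto⟩
  · rcases hcase with h1 | ⟨hic, h2 | h3⟩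
    · have : pvFirstCollision a b ≤ i := pvFC_le a b i hia hib h1
      have : ¬ a.length ≤ pvFirstCollision a b := by omega
      simp [this]
    · have : pvFirstCollision a c ≤ i := pvFC_le a c i hia hic h2
      have : ¬ a.length ≤ pvFirstCollision a c := by omega
      simp [this]
    · have : pvFirstCollision b c ≤ i := pvFC_le b c i hib hic h3
      have : ¬ a.length ≤ pvFirstCollision b c := by omega
      simp [this]

-- a triple that resolves and observes no collision has path1/path2 at least as long as path0
lemma pvResolves_lengths (a b c : List Int) (hres : pvResolves a b c = true)
    (hnc : ¬ ∃ i < a.length, pvEv a b c i = true) :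
    a.length ≤ b.length ∧ a.length ≤ c.length := by
  simp only [pvResolves, List.all_eq_true, List.mem_range, Bool.or_eq_true, Bool.and_eq_true,
    decide_eq_true_eq, beq_iff_eq, List.any_eq_true] at hres
  have hstep : ∀ i, i < a.length → i < b.length ∧ i < c.length := by
    intro i hi
    rcases hres i hi with ⟨hib, heq | hic⟩ | ⟨j, hj, hEv⟩
    · refine absurd ⟨i, hi, ?_⟩ hnc
      simp only [pvEv, Bool.and_eq_true, Bool.or_eq_true, decide_eq_true_eq, beq_iff_eq]
      exact ⟨hib, Or.inl heq⟩
    · exact ⟨hib, hic⟩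
    · exact absurd ⟨j, by omega, hEv⟩ hnc
  rcases Nat.eq_zero_or_pos a.length with h0 | h0
  · omega
  · have := hstep (a.length - 1) (by omega)
    omega

-- the decoded content of pvValidT
lemma pvValidT_iff (a b c : List Int) : pvValidT a b c = true ↔
    a.length ≤ b.length ∧ a.length ≤ c.length ∧
      ∀ i < a.length, a.getD i 0 ≠ b.getD i 0 ∧ a.getD i 0 ≠ c.getD i 0 ∧ b.getD i 0 ≠ c.getD i 0 := by
  simp [pvValidT, List.all_eq_true, List.mem_range, and_assoc]

-- the B-side triple test is true on a valid triple
lemma pvBterm_of_valid (a b c : List Int) (h : pvValidT a b c = true) :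
    (decide (a.length ≤ pvFirstCollision a b) &&
      (decide (a.length ≤ pvFirstCollision a c) && decide (a.length ≤ pvFirstCollision b c))) = true := by
  rw [pvValidT_iff] at h
  obtain ⟨hlb, hlc, hall⟩ := h
  have h1 : a.length ≤ pvFirstCollision a b :=
    (pvFC_ge_iff a b a.length le_rfl hlb).mpr (fun i hi => (hall i hi).1)
  have h2 : a.length ≤ pvFirstCollision a c :=
    (pvFC_ge_iff a c a.length le_rfl hlc).mpr (fun i hi => (hall i hi).2.1)
  have h3 : a.length ≤ pvFirstCollision b c :=
    (pvFC_ge_iff b c a.length hlb hlc).mpr (fun i hi => (hall i hi).2.2)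
  simp [h1, h2, h3]

-- A's inner check reports no collision on a valid triple
lemma pvCollide_of_valid (a b c : List Int) (h : pvValidT a b c = true) :
    pvCollide a b c = false := by
  rw [pvValidT_iff] at h
  obtain ⟨-, -, hall⟩ := h
  rw [Bool.eq_false_iff, Ne, pvCollide_iff]
  push_neg
  intro i hi
  exact ⟨(hall i hi).1, (hall i hi).2.1, (hall i hi).2.2⟩

-- the zip-of-tables triple loop of B, rewritten to a plain triple any
lemma pvAlt_canon (g0 g1 g2 : List (List Int)) :
    ((g0.zip ((g0.map (fun a => g1.map (fun b => pvFirstCollision a b))).zip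
        (g0.map (fun a => g2.map (fun c => pvFirstCollision a c))))).any (fun t =>
      (g1.zip (t.2.1.zip (g1.map (fun b => g2.map (fun c => pvFirstCollision b c))))).any (fun u =>
        decide (t.1.length ≤ u.2.1) &&
          (g2.zip (t.2.2.zip u.2.2)).any (fun v =>
            decide (t.1.length ≤ v.2.1) && decide (t.1.length ≤ v.2.2)))))
    = g0.any (fun a => g1.any (fun b => g2.any (fun c =>
        decide (a.length ≤ pvFirstCollision a b) &&
          (decide (a.length ≤ pvFirstCollision a c) && decide (a.length ≤ pvFirstCollision b c))))) := by
  rw [pvAny_zip_tables]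
  refine congrArg _ (funext fun a => ?_)
  dsimp only
  rw [pvAny_zip_tables]
  refine congrArg _ (funext fun b => ?_)
  dsimp only
  rw [pvAny_zip_tables, pvAnd_any]

-- membership in the flattened triple product
lemma pvMem_triples (g0 g1 g2 : List (List Int)) (t : List Int × List Int × List Int) :
    t ∈ pvTriples g0 g1 g2 ↔ t.1 ∈ g0 ∧ t.2.1 ∈ g1 ∧ t.2.2 ∈ g2 := by
  obtain ⟨a, b, c⟩ := t
  simp only [pvTriples, List.mem_flatMap, List.mem_map, Prod.mk.injEq]
  constructor
  · rintro ⟨x, hx, y, hy, z, hz, rfl, rfl, rfl⟩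
    exact ⟨hx, hy, hz⟩
  · rintro ⟨ha, hb, hc⟩
    exact ⟨a, ha, b, hb, c, hc, rfl, rfl, rfl⟩

-- ===== VERDICT (by name: the statement is the Claim_ definition above) =====
theorem valid_combination_spec : Claim_equal_valid_combination := by
  intro Paths valid_path _ hPre
  obtain ⟨-, hmain⟩ := hPre
  unfold Spec_valid_combination valid_combination valid_combination_alt
  simp only []
  rw [pvAlt_canon]
  unfold pvPreOK at hmain
  rcases hfind : (pvTriples (Paths.getD 0 []) (Paths.getD 1 []) (Paths.getD 2 [])).find? pvStop with _ | t
  · -- no stopping triple: every triple resolves and none is valid, pointwise equality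
    have hall := List.find?_eq_none.mp hfind
    refine pvAny_congr_mem _ _ _ (fun a ha => ?_)
    refine pvAny_congr_mem _ _ _ (fun b hb => ?_)
    refine pvAny_congr_mem _ _ _ (fun c hc => ?_)
    have hmem : ((a, b, c) : List Int × List Int × List Int) ∈
        pvTriples (Paths.getD 0 []) (Paths.getD 1 []) (Paths.getD 2 []) :=
      (pvMem_triples _ _ _ _).mpr ⟨ha, hb, hc⟩
    have hstop : pvStop (a, b, c) = false := Bool.eq_false_iff.mpr (hall _ hmem)
    simp only [pvStop, Bool.or_eq_false_iff, Bool.not_eq_false'] at hstop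
    obtain ⟨hres, -⟩ := hstop
    by_cases hcoll : ∃ i < a.length, pvEv a b c i = true
    · obtain ⟨hA, hB⟩ := pvColl_sound a b c hcoll
      rw [hA, hB]
      rfl
    · obtain ⟨hlb, hlc⟩ := pvResolves_lengths a b c hres hcoll
      rw [pvTriple a b c hlb hlc]
  · -- the first stopping triple is valid: both sides are true
    rw [hfind] at hmain
    simp only [Bool.and_eq_true] at hmain
    obtain ⟨hvalid, -⟩ := hmain
    obtain ⟨ha, hb, hc⟩ := (pvMem_triples _ _ _ _).mp (List.mem_of_find?_eq_some hfind)
    have hA : (Paths.getD 0 []).any (fun path0 => (Paths.getD 1 []).any (fun path1 =>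
        (Paths.getD 2 []).any (fun path2 => !(pvCollide path0 path1 path2)))) = true := by
      rw [List.any_eq_true]
      refine ⟨_, ha, ?_⟩
      rw [List.any_eq_true]
      refine ⟨_, hb, ?_⟩
      rw [List.any_eq_true]
      refine ⟨_, hc, ?_⟩
      rw [pvCollide_of_valid _ _ _ hvalid]
      rfl
    have hB : (Paths.getD 0 []).any (fun a => (Paths.getD 1 []).any (fun b =>
        (Paths.getD 2 []).any (fun c =>
          decide (a.length ≤ pvFirstCollision a b) &&
            (decide (a.length ≤ pvFirstCollision a c) &&
              decide (a.length ≤ pvFirstCollision b c))))) = true := by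
      rw [List.any_eq_true]
      refine ⟨_, ha, ?_⟩
      rw [List.any_eq_true]
      refine ⟨_, hb, ?_⟩
      rw [List.any_eq_true]
      exact ⟨_, hc, pvBterm_of_valid _ _ _ hvalid⟩
    rw [hA, hB]
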